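-- pv_equiv track=rewrite | github.com/cristian0396/Analisis-y-dise-o-de-algoritmos | Tarea 2/Train.py | ls
-- ===== SOURCE A (Python) =====
-- def ls (A, lena):
--   ans = 0
--   A.reverse()
--   lis,lds = [ None for _ in range(lena) ],[ None for _ in range(lena)]
--   for n in range(lena):
--     lis[n] = lds[n] = 1
--     for i in range(n):
--       if A[i] <= A[n] and lis[i] >= lis[n]: lis[n] = lis[i] + 1
--       if A[i] >= A[n] and lds[i] >= lds[n]: lds[n] = lds[i] + 1
--     ans = max(lis[n]+lds[n]-1, ans)
--   return ans
-- ===== SOURCE B (Python) =====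
-- def _lens(xs):
--     # patience method: lengths of longest non-decreasing subsequence ending at each index
--     tails = []
--     res = []
--     for x in xs:
--         lo, hi = 0, len(tails)
--         while lo < hi:
--             mid = (lo + hi) // 2
--             if tails[mid] <= x:
--                 lo = mid + 1
--             else:
--                 hi = mid
--         if lo == len(tails):
--             tails.append(x)
--         else:
--             tails[lo] = x
--         res.append(lo + 1)
--     return res
--
-- def ls(A, lena):
--     A.reverse()
--     xs = A[:max(lena, 0)]
--     up = _lens(xs)
--     down = _lens([-x for x in xs])
--     best = 0
--     for u, d in zip(up, down):
--         if u + d - 1 > best: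
--             best = u + d - 1
--     return best
-- ===== Notes on version B (the rewrite author's own statement) =====
-- stated objective: faster
-- what changed: Replaces the quadratic nested-loop DP over index pairs by the patience-sorting method: one pass keeps a sorted 'tails' array and finds each LIS/LDS ending-length by hand-written binary search (the non-increasing side is obtained by negating the values), then combines the two length arrays with one zip pass.
-- intended difference: When A is the empty list and lena is 1, A never touches the list and returns 1 as if one element existed; B returns 0, the correct longest-subsequence length for an empty list. — e.g. on ls([], 1): A returns 1, B returns 0
import Mathlib
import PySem

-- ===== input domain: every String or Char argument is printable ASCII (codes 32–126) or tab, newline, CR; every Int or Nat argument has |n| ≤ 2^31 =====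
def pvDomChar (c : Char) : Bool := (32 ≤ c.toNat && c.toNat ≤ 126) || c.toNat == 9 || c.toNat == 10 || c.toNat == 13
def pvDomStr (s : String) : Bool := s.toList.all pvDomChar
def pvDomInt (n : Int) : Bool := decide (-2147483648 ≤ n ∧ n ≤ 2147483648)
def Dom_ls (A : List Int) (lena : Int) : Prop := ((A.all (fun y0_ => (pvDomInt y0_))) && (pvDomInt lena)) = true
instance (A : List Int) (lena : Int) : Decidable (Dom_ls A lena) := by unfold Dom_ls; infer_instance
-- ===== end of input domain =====

-- B replaces A's O(n^2) nested-loop DP by patience sorting (binary search over a sorted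
-- tails array, O(n log n)); both reverse A first (A mutates its argument in place, B's
-- Python does the same reverse; the equivalence proved here is about the return value).


-- ===== PORT A =====
-- literal port of A; the [None]*lena arrays are ported as 0-filled Int lists because every
-- cell is written (set to 1) before it is ever read, so the None placeholder is never seen.
def ls (A : List Int) (lena : Int) : Int :=
  let ans : Int := 0
  let Ar := A.reverse
  let lis0 : List Int := (PySem.List.pyRange 0 lena 1).map (fun _ => 0)
  let lds0 : List Int := (PySem.List.pyRange 0 lena 1).map (fun _ => 0)
  let st := (PySem.List.pyRange 0 lena 1).foldl (fun (st : List Int × List Int × Int) n =>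
    let lis := st.1.set n.toNat 1
    let lds := st.2.1.set n.toNat 1
    let inner := (PySem.List.pyRange 0 n 1).foldl (fun (p : List Int × List Int) i =>
      let lis' := if PySem.List.pyGetD Ar i 0 ≤ PySem.List.pyGetD Ar n 0 ∧
                     PySem.List.pyGetD p.1 i 0 ≥ PySem.List.pyGetD p.1 n 0
                  then p.1.set n.toNat (PySem.List.pyGetD p.1 i 0 + 1) else p.1
      let lds' := if PySem.List.pyGetD Ar i 0 ≥ PySem.List.pyGetD Ar n 0 ∧
                     PySem.List.pyGetD p.2 i 0 ≥ PySem.List.pyGetD p.2 n 0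
                  then p.2.set n.toNat (PySem.List.pyGetD p.2 i 0 + 1) else p.2
      (lis', lds')) (lis, lds)
    (inner.1, inner.2,
      max (PySem.List.pyGetD inner.1 n 0 + PySem.List.pyGetD inner.2 n 0 - 1) st.2.2))
    (lis0, lds0, ans)
  st.2.2

-- ===== PORT B =====
-- the 'while lo < hi' binary search of Source B (lo, hi are always ≥ 0, so Nat indices)
def bisectR (t : List Int) (x : Int) (lo hi : Nat) : Nat :=
  if _h : lo < hi then
    let mid := (lo + hi) / 2
    if t.getD mid 0 ≤ x then bisectR t x (mid + 1) hi else bisectR t x lo mid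
  else lo
termination_by hi - lo
decreasing_by
  · have : (lo + hi) / 2 < hi := Nat.div_lt_of_lt_mul (by omega)
    omega
  · have h1 : lo ≤ (lo + hi) / 2 := Nat.le_div_iff_mul_le (by omega) |>.mpr (by omega)
    omega

-- one iteration of the 'for x in xs' loop of _lens: state = (tails, res)
def lensStep (st : List Int × List Int) (x : Int) : List Int × List Int :=
  let tails := st.1
  let pos := bisectR tails x 0 tails.length
  let tails' := if pos = tails.length then tails ++ [x] else tails.set pos x
  (tails', st.2 ++ [(pos : Int) + 1])

def lensB (xs : List Int) : List Int := (xs.foldl lensStep ([], [])).2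

def ls_alt (A : List Int) (lena : Int) : Int :=
  let Ar := A.reverse
  let xs := Ar.take (max lena 0).toNat   -- A[:max(lena, 0)]
  let up := lensB xs
  let down := lensB (xs.map (fun x => -x))
  (up.zip down).foldl
    (fun best ud => if ud.1 + ud.2 - 1 > best then ud.1 + ud.2 - 1 else best) 0

-- ===== PRECONDITION & SPEC =====
-- Pre_ls excludes exactly the inputs where A raises IndexError (reading A[n] for n ≥ len(A)):
-- every lena > len(A) raises except the corner A = [] ∧ lena = 1, which returns and is kept
-- inside the claim as the intended difference D_ls below.
def Pre_ls (A : List Int) (lena : Int) : Prop := lena ≤ A.length ∨ (A = [] ∧ lena = 1)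
instance (A : List Int) (lena : Int) : Decidable (Pre_ls A lena) := by unfold Pre_ls; infer_instance
def pvWitness_ls : List Int × Int := ([3, 1, 2, 2, 0, 4], 6)

-- When A is the empty list and lena is 1, A never touches the list and returns 1 as if one
-- element existed; B returns 0, the correct longest-subsequence length for an empty list.
def D_ls (A : List Int) (lena : Int) : Prop := A = [] ∧ lena = 1
instance (A : List Int) (lena : Int) : Decidable (D_ls A lena) := by unfold D_ls; infer_instance

def Spec_ls (A : List Int) (lena : Int) (out : Int) : Prop := ¬ D_ls A lena → out = ls_alt A lena
instance (A : List Int) (lena : Int) (out : Int) : Decidable (Spec_ls A lena out) := by unfold Spec_ls; infer_instance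

def pvDiffWitness_ls : List Int × Int := ([], 1)
def pvDiffWitnessOut_ls : Int × Int := (1, 0)

-- ===== CLAIM (what is proved, stated in full; the proofs are below) =====
def Claim_unchanged_ls : Prop := ∀ (A : List Int) (lena : Int), Dom_ls A lena → Pre_ls A lena → Spec_ls A lena (ls A lena)
def Claim_changed_ls : Prop := Dom_ls (pvDiffWitness_ls.1) (pvDiffWitness_ls.2) ∧ Pre_ls (pvDiffWitness_ls.1) (pvDiffWitness_ls.2) ∧ D_ls (pvDiffWitness_ls.1) (pvDiffWitness_ls.2) ∧ ls (pvDiffWitness_ls.1) (pvDiffWitness_ls.2) = pvDiffWitnessOut_ls.1 ∧ ls_alt (pvDiffWitness_ls.1) (pvDiffWitness_ls.2) = pvDiffWitnessOut_ls.2 ∧ pvDiffWitnessOut_ls.1 ≠ pvDiffWitnessOut_ls.2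
def Claim_exact_ls : Prop := ∀ (A : List Int) (lena : Int), Dom_ls A lena → Pre_ls A lena → D_ls A lena → ls A lena ≠ ls_alt A lena

-- ===== LEMMAS AND PROOFS =====

-- ---------- small list-indexing helpers ----------
theorem getD_append_lt (t s : List Int) (k : Nat) (h : k < t.length) :
    (t ++ s).getD k 0 = t.getD k 0 := by
  simp [List.getD, List.getElem?_append_left h]

theorem getD_append_len (t s : List Int) (c : Int) :
    (t ++ c :: s).getD t.length 0 = c := by
  simp [List.getD]

theorem set_mid (t s : List Int) (c v : Int) :
    (t ++ c :: s).set t.length v = t ++ v :: s := by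
  induction t with
  | nil => rfl
  | cons a t ih => simp [ih]

theorem getD_set (t : List Int) (p k : Nat) (v : Int) (hp : p < t.length) :
    (t.set p v).getD k 0 = if k = p then v else t.getD k 0 := by
  by_cases hk : k = p
  · subst hk; simp [List.getD, hp]
  · simp [List.getD, List.getElem?_set_ne (by omega : p ≠ k), hk]

-- the common mathematical form both ports are reduced to:
-- dpPairs c xs lists (value, length of longest c-chain ending there) in order
def leB (a b : Int) : Bool := a ≤ b
def geB (a b : Int) : Bool := b ≤ a
def dpMax (c : Int → Int → Bool) (x : Int) (ps : List (Int × Int)) : Int :=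
  ps.foldl (fun m p => if c p.1 x then max m p.2 else m) 0
def dpStep (c : Int → Int → Bool) (ps : List (Int × Int)) (x : Int) : List (Int × Int) :=
  ps ++ [(x, 1 + dpMax c x ps)]
def dpPairs (c : Int → Int → Bool) (xs : List Int) : List (Int × Int) := xs.foldl (dpStep c) []
def dpVals (c : Int → Int → Bool) (xs : List Int) : List Int := (dpPairs c xs).map Prod.snd
def ansFold (up down : List Int) : Int :=
  (up.zip down).foldl (fun a ud => max (ud.1 + ud.2 - 1) a) 0

-- ---------- dpMax / dpPairs facts ----------
theorem foldl_dpmax_ge_init (c : Int → Int → Bool) (x : Int) (ps : List (Int × Int)) (a : Int) :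
    a ≤ ps.foldl (fun m p => if c p.1 x then max m p.2 else m) a := by
  induction ps generalizing a with
  | nil => exact le_refl a
  | cons p ps ih =>
      refine le_trans ?_ (ih (if c p.1 x then max a p.2 else a))
      split <;> simp

theorem dpMax_nonneg (c : Int → Int → Bool) (x : Int) (ps : List (Int × Int)) :
    0 ≤ dpMax c x ps := foldl_dpmax_ge_init c x ps 0

theorem foldl_dpmax_ge_mem (c : Int → Int → Bool) (x : Int) (ps : List (Int × Int)) (a : Int)
    (pr : Int × Int) (h : pr ∈ ps) (hc : c pr.1 x) :
    pr.2 ≤ ps.foldl (fun m p => if c p.1 x then max m p.2 else m) a := by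
  induction ps generalizing a with
  | nil => cases h
  | cons p ps ih =>
      rcases List.mem_cons.mp h with rfl | h'
      · refine le_trans ?_ (foldl_dpmax_ge_init c x ps _)
        simp [hc]
      · exact ih _ h'

theorem dpMax_ge_mem (c : Int → Int → Bool) (x : Int) (ps : List (Int × Int))
    (pr : Int × Int) (h : pr ∈ ps) (hc : c pr.1 x) : pr.2 ≤ dpMax c x ps :=
  foldl_dpmax_ge_mem c x ps 0 pr h hc

theorem foldl_dpmax_le (c : Int → Int → Bool) (x : Int) (ps : List (Int × Int)) (a b : Int)
    (hab : a ≤ b) (h : ∀ pr ∈ ps, c pr.1 x = true → pr.2 ≤ b) :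
    ps.foldl (fun m p => if c p.1 x then max m p.2 else m) a ≤ b := by
  induction ps generalizing a with
  | nil => exact hab
  | cons p ps ih =>
      refine ih _ ?_ (fun pr hpr => h pr (List.mem_cons_of_mem _ hpr))
      by_cases hc : c p.1 x = true
      · simpa [hc] using max_le hab (h p List.mem_cons_self hc)
      · simpa [hc] using hab

theorem dpMax_le (c : Int → Int → Bool) (x : Int) (ps : List (Int × Int)) (b : Int)
    (hb : 0 ≤ b) (h : ∀ pr ∈ ps, c pr.1 x = true → pr.2 ≤ b) : dpMax c x ps ≤ b :=
  foldl_dpmax_le c x ps 0 b hb h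

theorem dpMax_concat (c : Int → Int → Bool) (x : Int) (ps : List (Int × Int)) (pr : Int × Int) :
    dpMax c x (ps ++ [pr]) = if c pr.1 x then max (dpMax c x ps) pr.2 else dpMax c x ps := by
  simp [dpMax, List.foldl_append]

theorem dpPairs_concat (c : Int → Int → Bool) (xs : List Int) (x : Int) :
    dpPairs c (xs ++ [x]) = dpPairs c xs ++ [(x, 1 + dpMax c x (dpPairs c xs))] := by
  simp [dpPairs, List.foldl_append, dpStep]

theorem dpPairs_fst (c : Int → Int → Bool) (xs : List Int) :
    (dpPairs c xs).map Prod.fst = xs := by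
  induction xs using List.reverseRecOn with
  | nil => rfl
  | append_singleton xs x ih => simp [dpPairs_concat, ih]

theorem length_dpPairs (c : Int → Int → Bool) (xs : List Int) :
    (dpPairs c xs).length = xs.length := by
  have := congrArg List.length (dpPairs_fst c xs)
  simpa using this

theorem dpVals_concat (c : Int → Int → Bool) (xs : List Int) (x : Int) :
    dpVals c (xs ++ [x]) = dpVals c xs ++ [1 + dpMax c x (dpPairs c xs)] := by
  simp [dpVals, dpPairs_concat]

theorem length_dpVals (c : Int → Int → Bool) (xs : List Int) :
    (dpVals c xs).length = xs.length := by
  simp [dpVals, length_dpPairs]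

-- ---------- binary search ----------
def Mono (t : List Int) : Prop :=
  ∀ i j : Nat, i ≤ j → j < t.length → t.getD i 0 ≤ t.getD j 0

theorem bisectR_spec (t : List Int) (x : Int) (d : Nat) :
    ∀ lo hi : Nat, hi - lo ≤ d → lo ≤ hi → hi ≤ t.length →
    (∀ k, k < lo → t.getD k 0 ≤ x) →
    (∀ k, hi ≤ k → k < t.length → x < t.getD k 0) →
    Mono t →
    lo ≤ bisectR t x lo hi ∧ bisectR t x lo hi ≤ hi ∧
    (∀ k, k < bisectR t x lo hi → t.getD k 0 ≤ x) ∧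
    (∀ k, bisectR t x lo hi ≤ k → k < t.length → x < t.getD k 0) := by
  induction d with
  | zero =>
      intro lo hi hd hlh hht hlow hhigh hmono
      have : ¬ lo < hi := by omega
      rw [bisectR]; simp only [this, dite_false]
      exact ⟨le_refl _, hlh, hlow, fun k hk hkt => hhigh k (by omega) hkt⟩
  | succ d ih =>
      intro lo hi hd hlh hht hlow hhigh hmono
      rw [bisectR]
      by_cases hlt : lo < hi
      · simp only [hlt, dite_true]
        set mid := (lo + hi) / 2 with hmid
        have hmlo : lo ≤ mid := by omega
        have hmhi : mid < hi := by omega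
        by_cases hc : t.getD mid 0 ≤ x
        · simp only [hc, if_true]
          refine (ih (mid + 1) hi (by omega) (by omega) hht ?_ hhigh hmono).imp (by omega) id
          intro k hk
          rcases Nat.lt_or_ge k lo with h' | h'
          · exact hlow k h'
          · exact le_trans (hmono k mid (by omega) (by omega)) hc
        · simp only [hc, if_false]
          refine (ih lo mid (by omega) (by omega) (by omega) hlow ?_ hmono).imp id (fun h => h.imp (by omega) id)
          intro k hk hkt
          exact lt_of_lt_of_le (by omega : x < t.getD mid 0) (hmono mid k hk hkt)
      · simp only [hlt, dite_false]
        exact ⟨le_refl _, hlh, hlow, fun k hk hkt => hhigh k (by omega) hkt⟩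

-- ---------- the patience-loop invariant ----------
theorem lens_inv :
    ∀ (xs p : List Int) (t res : List Int),
    Mono t →
    (∀ pr ∈ dpPairs leB p, 1 ≤ pr.2 ∧ pr.2 ≤ (t.length : Int) ∧ t.getD (pr.2 - 1).toNat 0 ≤ pr.1) →
    (∀ k : Nat, k < t.length → ∃ pr ∈ dpPairs leB p, pr.1 = t.getD k 0 ∧ (k : Int) + 1 ≤ pr.2) →
    res = dpVals leB p →
    (xs.foldl lensStep (t, res)).2 = dpVals leB (p ++ xs) := by
  intro xs
  induction xs with
  | nil => intro p t res _ _ _ hres; simpa using hres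
  | cons x xs ih =>
      intro p t res hmono hub hlb hres
      have hrange := bisectR_spec t x t.length 0 t.length (by omega) (by omega) (le_refl _)
        (by omega) (fun k hk hkt => absurd hkt (by omega)) hmono
      set pos := bisectR t x 0 t.length with hposdef
      obtain ⟨-, hposle, hbelow, habove⟩ := hrange
      -- dpMax of the new element equals pos
      have hMle : dpMax leB x (dpPairs leB p) ≤ (pos : Int) := by
        refine dpMax_le _ _ _ _ (by positivity) ?_
        intro pr hpr hc
        obtain ⟨h1, h2, h3⟩ := hub pr hpr
        by_contra hgt
        have hidx : pos ≤ (pr.2 - 1).toNat := by omega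
        have hidx2 : (pr.2 - 1).toNat < t.length := by omega
        have := habove _ hidx hidx2
        have hc' : pr.1 ≤ x := by simpa [leB] using hc
        omega
      have hMge : (pos : Int) ≤ dpMax leB x (dpPairs leB p) := by
        rcases Nat.eq_zero_or_pos pos with h0 | h0
        · simp [h0, dpMax_nonneg]
        · obtain ⟨pr, hpr, hpr1, hpr2⟩ := hlb (pos - 1) (by omega)
          have hc : leB pr.1 x = true := by
            have := hbelow (pos - 1) (by omega)
            simp [leB]; omega
          have := dpMax_ge_mem leB x _ pr hpr hc
          omega
      have hM : dpMax leB x (dpPairs leB p) = (pos : Int) := le_antisymm hMle hMge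
      have hpairs' : dpPairs leB (p ++ [x]) = dpPairs leB p ++ [(x, 1 + (pos : Int))] := by
        rw [dpPairs_concat, hM]
      have hres' : res ++ [(pos : Int) + 1] = dpVals leB (p ++ [x]) := by
        rw [dpVals_concat, hM, hres]; ring_nf
      have hassoc : p ++ x :: xs = (p ++ [x]) ++ xs := by simp
      by_cases hp : pos = t.length
      -- ===== case: append x at the end =====
      · have hstep : lensStep (t, res) x = (t ++ [x], res ++ [(pos : Int) + 1]) := by
          simp only [lensStep, ← hposdef, if_pos hp]
        have hlen' : (t ++ [x]).length = t.length + 1 := by simp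
        have getA : ∀ k, k < t.length → (t ++ [x]).getD k 0 = t.getD k 0 :=
          fun k hk => getD_append_lt t [x] k hk
        have getN : (t ++ [x]).getD t.length 0 = x := getD_append_len t [] x
        have hmono' : Mono (t ++ [x]) := by
          intro i j hij hj
          rw [hlen'] at hj
          by_cases hjl : j = t.length
          · subst hjl
            rw [getN]
            by_cases hil : i = t.length
            · subst hil; rw [getN]
            · rw [getA i (by omega)]; exact hbelow i (by omega)
          · have hjlt : j < t.length := by omega
            rw [getA i (by omega), getA j hjlt]
            exact hmono i j hij hjlt
        have hub' : ∀ pr ∈ dpPairs leB (p ++ [x]),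
            1 ≤ pr.2 ∧ pr.2 ≤ ((t ++ [x]).length : Int) ∧ (t ++ [x]).getD (pr.2 - 1).toNat 0 ≤ pr.1 := by
          rw [hpairs']
          intro pr hpr
          rcases List.mem_append.mp hpr with hold | hnew
          · obtain ⟨h1, h2, h3⟩ := hub pr hold
            refine ⟨h1, by rw [hlen']; push_cast; omega, ?_⟩
            rw [getA _ (by omega)]; exact h3
          · simp only [List.mem_singleton] at hnew
            subst hnew
            refine ⟨by simp, by rw [hlen']; push_cast; omega, ?_⟩
            have he : (((x, 1 + (pos : Int)).2 - 1)).toNat = t.length := by simp; omega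
            rw [he, getN]
        have hlb' : ∀ k : Nat, k < (t ++ [x]).length →
            ∃ pr ∈ dpPairs leB (p ++ [x]), pr.1 = (t ++ [x]).getD k 0 ∧ (k : Int) + 1 ≤ pr.2 := by
          rw [hpairs']
          intro k hk
          rw [hlen'] at hk
          by_cases hkl : k = t.length
          · subst hkl
            exact ⟨(x, 1 + (pos : Int)), by simp, by rw [getN], by simp; omega⟩
          · have hklt : k < t.length := by omega
            obtain ⟨pr, hpr, h1, h2⟩ := hlb k hklt
            exact ⟨pr, List.mem_append_left _ hpr, by rw [getA k hklt]; exact h1, h2⟩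
        calc ((x :: xs).foldl lensStep (t, res)).2
            = (xs.foldl lensStep (t ++ [x], res ++ [(pos : Int) + 1])).2 := by
              rw [List.foldl_cons, hstep]
          _ = dpVals leB ((p ++ [x]) ++ xs) := ih (p ++ [x]) _ _ hmono' hub' hlb' hres'
          _ = dpVals leB (p ++ x :: xs) := by rw [hassoc]
      -- ===== case: overwrite t[pos] with x =====
      · have hplt : pos < t.length := by omega
        have hxlt : x < t.getD pos 0 := habove pos (le_refl _) hplt
        have hstep : lensStep (t, res) x = (t.set pos x, res ++ [(pos : Int) + 1]) := by
          simp only [lensStep, ← hposdef, if_neg hp]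
        have hlen' : (t.set pos x).length = t.length := by simp
        have getS : ∀ k : Nat, (t.set pos x).getD k 0 = if k = pos then x else t.getD k 0 :=
          fun k => getD_set t pos k x hplt
        have hmono' : Mono (t.set pos x) := by
          intro i j hij hj
          rw [hlen'] at hj
          rw [getS i, getS j]
          by_cases hip : i = pos <;> by_cases hjp : j = pos
          · simp [hip, hjp]
          · simp only [hip, hjp, if_true, if_false]
            have := hmono pos j (by omega) hj
            omega
          · simp only [hip, hjp, if_false, if_true]
            exact hbelow i (by omega)
          · simp only [hip, hjp, if_false]
            exact hmono i j hij hj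
        have hub' : ∀ pr ∈ dpPairs leB (p ++ [x]),
            1 ≤ pr.2 ∧ pr.2 ≤ ((t.set pos x).length : Int) ∧ (t.set pos x).getD (pr.2 - 1).toNat 0 ≤ pr.1 := by
          rw [hpairs']
          intro pr hpr
          rcases List.mem_append.mp hpr with hold | hnew
          · obtain ⟨h1, h2, h3⟩ := hub pr hold
            refine ⟨h1, by rw [hlen']; exact h2, ?_⟩
            rw [getS]
            by_cases hip : (pr.2 - 1).toNat = pos
            · rw [if_pos hip]
              rw [hip] at h3
              omega
            · rw [if_neg hip]; exact h3
          · simp only [List.mem_singleton] at hnew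
            subst hnew
            refine ⟨by simp, by rw [hlen']; push_cast; omega, ?_⟩
            have he : (((x, 1 + (pos : Int)).2 - 1)).toNat = pos := by simp
            rw [he, getS, if_pos rfl]
        have hlb' : ∀ k : Nat, k < (t.set pos x).length →
            ∃ pr ∈ dpPairs leB (p ++ [x]), pr.1 = (t.set pos x).getD k 0 ∧ (k : Int) + 1 ≤ pr.2 := by
          rw [hpairs']
          intro k hk
          rw [hlen'] at hk
          by_cases hkp : k = pos
          · subst hkp
            exact ⟨(x, 1 + (pos : Int)), by simp, by rw [getS, if_pos rfl], by simp⟩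
          · obtain ⟨pr, hpr, h1, h2⟩ := hlb k hk
            exact ⟨pr, List.mem_append_left _ hpr, by rw [getS, if_neg hkp]; exact h1, h2⟩
        calc ((x :: xs).foldl lensStep (t, res)).2
            = (xs.foldl lensStep (t.set pos x, res ++ [(pos : Int) + 1])).2 := by
              rw [List.foldl_cons, hstep]
          _ = dpVals leB ((p ++ [x]) ++ xs) := ih (p ++ [x]) _ _ hmono' hub' hlb' hres'
          _ = dpVals leB (p ++ x :: xs) := by rw [hassoc]

-- ---------- A-side: named forms of A's loops (proof-only helpers) ----------
def innerF (Ar : List Int) (n : Int) (p : List Int × List Int) (i : Int) : List Int × List Int :=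
  let lis' := if PySem.List.pyGetD Ar i 0 ≤ PySem.List.pyGetD Ar n 0 ∧
                 PySem.List.pyGetD p.1 i 0 ≥ PySem.List.pyGetD p.1 n 0
              then p.1.set n.toNat (PySem.List.pyGetD p.1 i 0 + 1) else p.1
  let lds' := if PySem.List.pyGetD Ar i 0 ≥ PySem.List.pyGetD Ar n 0 ∧
                 PySem.List.pyGetD p.2 i 0 ≥ PySem.List.pyGetD p.2 n 0
              then p.2.set n.toNat (PySem.List.pyGetD p.2 i 0 + 1) else p.2
  (lis', lds')

def outerF (Ar : List Int) (st : List Int × List Int × Int) (n : Int) : List Int × List Int × Int :=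
  let lis := st.1.set n.toNat 1
  let lds := st.2.1.set n.toNat 1
  let inner := (PySem.List.pyRange 0 n 1).foldl (innerF Ar n) (lis, lds)
  (inner.1, inner.2,
    max (PySem.List.pyGetD inner.1 n 0 + PySem.List.pyGetD inner.2 n 0 - 1) st.2.2)

theorem ls_eq (A : List Int) (lena : Int) :
    ls A lena = ((PySem.List.pyRange 0 lena 1).foldl (outerF A.reverse)
      ((PySem.List.pyRange 0 lena 1).map (fun _ => 0),
       (PySem.List.pyRange 0 lena 1).map (fun _ => 0), 0)).2.2 := rfl

theorem getD_take' (l : List Int) (N k : Nat) (h : k < N) :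
    (l.take N).getD k 0 = l.getD k 0 := by
  simp [List.getD, List.getElem?_take_of_lt h]

theorem getD_map_fst (ps : List (Int × Int)) (k : Nat) (h : k < ps.length) :
    (ps.map Prod.fst).getD k 0 = ps[k].1 := by
  simp [List.getD, List.getElem?_eq_getElem h]

theorem getD_map_snd (ps : List (Int × Int)) (k : Nat) (h : k < ps.length) :
    (ps.map Prod.snd).getD k 0 = ps[k].2 := by
  simp [List.getD, List.getElem?_eq_getElem h]

-- one inner-loop step updates the candidate cell of BOTH arrays exactly like dpMax does
theorem inner_step (Ar : List Int) (L N m : Nat) (hm : m < N) (hN : N < L) (hL : L ≤ Ar.length)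
    (Z1 Z2 : List Int) :
    innerF Ar (N : Int)
      (dpVals leB (Ar.take N) ++ (1 + dpMax leB (Ar.getD N 0) ((dpPairs leB (Ar.take N)).take m)) :: Z1,
       dpVals geB (Ar.take N) ++ (1 + dpMax geB (Ar.getD N 0) ((dpPairs geB (Ar.take N)).take m)) :: Z2)
      (m : Int)
    = (dpVals leB (Ar.take N) ++ (1 + dpMax leB (Ar.getD N 0) ((dpPairs leB (Ar.take N)).take (m + 1))) :: Z1,
       dpVals geB (Ar.take N) ++ (1 + dpMax geB (Ar.getD N 0) ((dpPairs geB (Ar.take N)).take (m + 1))) :: Z2) := by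
  have htk : (Ar.take N).length = N := by simp; omega
  set x := Ar.getD N 0 with hx
  set ps1 := dpPairs leB (Ar.take N) with hps1
  set ps2 := dpPairs geB (Ar.take N) with hps2
  have hl1 : ps1.length = N := by rw [hps1, length_dpPairs, htk]
  have hl2 : ps2.length = N := by rw [hps2, length_dpPairs, htk]
  have hm1 : m < ps1.length := by omega
  have hm2 : m < ps2.length := by omega
  have hP1len : (dpVals leB (Ar.take N)).length = N := by rw [length_dpVals, htk]
  have hP2len : (dpVals geB (Ar.take N)).length = N := by rw [length_dpVals, htk]
  have rAm1 : Ar.getD m 0 = ps1[m].1 := by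
    rw [← getD_take' Ar N m hm, ← dpPairs_fst leB (Ar.take N), ← hps1, getD_map_fst ps1 m hm1]
  have rAm2 : Ar.getD m 0 = ps2[m].1 := by
    rw [← getD_take' Ar N m hm, ← dpPairs_fst geB (Ar.take N), ← hps2, getD_map_fst ps2 m hm2]
  have rl1 : (dpVals leB (Ar.take N) ++ (1 + dpMax leB x (ps1.take m)) :: Z1).getD m 0 = ps1[m].2 := by
    rw [getD_append_lt _ _ m (by rw [hP1len]; omega)]
    have : dpVals leB (Ar.take N) = ps1.map Prod.snd := rfl
    rw [this, getD_map_snd ps1 m hm1]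
  have rl2 : (dpVals geB (Ar.take N) ++ (1 + dpMax geB x (ps2.take m)) :: Z2).getD m 0 = ps2[m].2 := by
    rw [getD_append_lt _ _ m (by rw [hP2len]; omega)]
    have : dpVals geB (Ar.take N) = ps2.map Prod.snd := rfl
    rw [this, getD_map_snd ps2 m hm2]
  have rn1 : (dpVals leB (Ar.take N) ++ (1 + dpMax leB x (ps1.take m)) :: Z1).getD N 0
      = 1 + dpMax leB x (ps1.take m) := by
    have h := getD_append_len (dpVals leB (Ar.take N)) Z1 (1 + dpMax leB x (ps1.take m))
    rw [hP1len] at h; exact h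
  have rn2 : (dpVals geB (Ar.take N) ++ (1 + dpMax geB x (ps2.take m)) :: Z2).getD N 0
      = 1 + dpMax geB x (ps2.take m) := by
    have h := getD_append_len (dpVals geB (Ar.take N)) Z2 (1 + dpMax geB x (ps2.take m))
    rw [hP2len] at h; exact h
  have hset1 : ∀ v : Int, (dpVals leB (Ar.take N) ++ (1 + dpMax leB x (ps1.take m)) :: Z1).set N v
      = dpVals leB (Ar.take N) ++ v :: Z1 := by
    intro v
    have h := set_mid (dpVals leB (Ar.take N)) Z1 (1 + dpMax leB x (ps1.take m)) v
    rw [hP1len] at h; exact h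
  have hset2 : ∀ v : Int, (dpVals geB (Ar.take N) ++ (1 + dpMax geB x (ps2.take m)) :: Z2).set N v
      = dpVals geB (Ar.take N) ++ v :: Z2 := by
    intro v
    have h := set_mid (dpVals geB (Ar.take N)) Z2 (1 + dpMax geB x (ps2.take m)) v
    rw [hP2len] at h; exact h
  have hmax1 : dpMax leB x (ps1.take (m + 1))
      = if leB ps1[m].1 x then max (dpMax leB x (ps1.take m)) ps1[m].2 else dpMax leB x (ps1.take m) := by
    rw [List.take_succ_eq_append_getElem hm1, dpMax_concat]
  have hmax2 : dpMax geB x (ps2.take (m + 1))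
      = if geB ps2[m].1 x then max (dpMax geB x (ps2.take m)) ps2[m].2 else dpMax geB x (ps2.take m) := by
    rw [List.take_succ_eq_append_getElem hm2, dpMax_concat]
  have hvv : ps2[m].1 = ps1[m].1 := by rw [← rAm1, ← rAm2]
  rw [hvv] at hmax2
  simp only [innerF, PySem.List.pyGetD_natCast, Int.toNat_natCast]
  rw [← hx, rl1, rl2, rn1, rn2, rAm1, hmax1, hmax2]
  set v := ps1[m].1
  set w1 := ps1[m].2
  set w2 := ps2[m].2
  set M1 := dpMax leB x (ps1.take m)
  set M2 := dpMax geB x (ps2.take m)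
  refine Prod.ext ?_ ?_
  · show (if v ≤ x ∧ w1 ≥ 1 + M1
        then (dpVals leB (Ar.take N) ++ (1 + M1) :: Z1).set N (w1 + 1)
        else dpVals leB (Ar.take N) ++ (1 + M1) :: Z1)
      = dpVals leB (Ar.take N) ++ (1 + if leB v x then max M1 w1 else M1) :: Z1
    by_cases hvx : v ≤ x
    · rw [if_pos (show leB v x = true by simp [leB, hvx])]
      by_cases hw : w1 ≥ 1 + M1
      · rw [if_pos ⟨hvx, hw⟩, hset1]
        have hval : w1 + 1 = 1 + max M1 w1 := by omega
        rw [hval]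
      · rw [if_neg (by tauto)]
        have hval : (1 + M1 : Int) = 1 + max M1 w1 := by omega
        rw [hval]
    · rw [if_neg (by tauto), if_neg (show ¬ leB v x = true by simp [leB, hvx])]
  · show (if v ≥ x ∧ w2 ≥ 1 + M2
        then (dpVals geB (Ar.take N) ++ (1 + M2) :: Z2).set N (w2 + 1)
        else dpVals geB (Ar.take N) ++ (1 + M2) :: Z2)
      = dpVals geB (Ar.take N) ++ (1 + if geB v x then max M2 w2 else M2) :: Z2
    by_cases hvx : x ≤ v
    · rw [if_pos (show geB v x = true by simp [geB, hvx])]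
      by_cases hw : w2 ≥ 1 + M2
      · rw [if_pos ⟨hvx, hw⟩, hset2]
        have hval : w2 + 1 = 1 + max M2 w2 := by omega
        rw [hval]
      · rw [if_neg (by tauto)]
        have hval : (1 + M2 : Int) = 1 + max M2 w2 := by omega
        rw [hval]
    · rw [if_neg (by tauto), if_neg (show ¬ geB v x = true by simp [geB, hvx])]

theorem inner_inv (Ar : List Int) (L N : Nat) (hN : N < L) (hL : L ≤ Ar.length) (Z1 Z2 : List Int) :
    ∀ m, m ≤ N →
    ((List.range m).map (fun k : Nat => (k : Int))).foldl (innerF Ar (N : Int))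
      (dpVals leB (Ar.take N) ++ (1 : Int) :: Z1, dpVals geB (Ar.take N) ++ (1 : Int) :: Z2)
    = (dpVals leB (Ar.take N) ++ (1 + dpMax leB (Ar.getD N 0) ((dpPairs leB (Ar.take N)).take m)) :: Z1,
       dpVals geB (Ar.take N) ++ (1 + dpMax geB (Ar.getD N 0) ((dpPairs geB (Ar.take N)).take m)) :: Z2) := by
  intro m
  induction m with
  | zero => intro _; simp [dpMax]
  | succ m ih =>
      intro hm1
      rw [List.range_succ, List.map_append, List.foldl_append, ih (by omega),
        List.map_singleton, List.foldl_cons, List.foldl_nil]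
      exact inner_step Ar L N m (by omega) hN hL Z1 Z2

theorem ansFold_concat (U D : List Int) (u d : Int) (h : U.length = D.length) :
    ansFold (U ++ [u]) (D ++ [d]) = max (u + d - 1) (ansFold U D) := by
  unfold ansFold
  rw [List.zip_append h, List.foldl_append]
  simp

theorem outer_step (Ar : List Int) (L N : Nat) (hN : N < L) (hL : L ≤ Ar.length) (a : Int) :
    outerF Ar (dpVals leB (Ar.take N) ++ List.replicate (L - N) 0,
               dpVals geB (Ar.take N) ++ List.replicate (L - N) 0, a) (N : Int)
    = (dpVals leB (Ar.take (N + 1)) ++ List.replicate (L - (N + 1)) 0,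
       dpVals geB (Ar.take (N + 1)) ++ List.replicate (L - (N + 1)) 0,
       max ((1 + dpMax leB (Ar.getD N 0) (dpPairs leB (Ar.take N)))
            + (1 + dpMax geB (Ar.getD N 0) (dpPairs geB (Ar.take N))) - 1) a) := by
  have htk : (Ar.take N).length = N := by simp; omega
  have hP1len : (dpVals leB (Ar.take N)).length = N := by rw [length_dpVals, htk]
  have hP2len : (dpVals geB (Ar.take N)).length = N := by rw [length_dpVals, htk]
  have hrep : List.replicate (L - N) (0 : Int) = (0 : Int) :: List.replicate (L - N - 1) 0 := by
    rw [← List.replicate_succ]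
    congr 1
    omega
  have hset1 : (dpVals leB (Ar.take N) ++ (0 : Int) :: List.replicate (L - N - 1) 0).set N 1
      = dpVals leB (Ar.take N) ++ (1 : Int) :: List.replicate (L - N - 1) 0 := by
    have h := set_mid (dpVals leB (Ar.take N)) (List.replicate (L - N - 1) 0) 0 1
    rw [hP1len] at h; exact h
  have hset2 : (dpVals geB (Ar.take N) ++ (0 : Int) :: List.replicate (L - N - 1) 0).set N 1
      = dpVals geB (Ar.take N) ++ (1 : Int) :: List.replicate (L - N - 1) 0 := by
    have h := set_mid (dpVals geB (Ar.take N)) (List.replicate (L - N - 1) 0) 0 1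
    rw [hP2len] at h; exact h
  have hrange : PySem.List.pyRange 0 (N : Int) 1 = (List.range N).map (fun k : Nat => (k : Int)) := by
    rw [PySem.List.pyRange_one]
    have h1 : ((N : Int) - 0).toNat = N := by omega
    rw [h1]
    exact List.map_congr_left (fun k _ => by omega)
  have htkfull1 : (dpPairs leB (Ar.take N)).take N = dpPairs leB (Ar.take N) :=
    List.take_of_length_le (by rw [length_dpPairs, htk])
  have htkfull2 : (dpPairs geB (Ar.take N)).take N = dpPairs geB (Ar.take N) :=
    List.take_of_length_le (by rw [length_dpPairs, htk])
  have hgetN : Ar.getD N 0 = Ar[N]'(by omega) := by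
    simp [List.getD, List.getElem?_eq_getElem (show N < Ar.length by omega)]
  have hsplit1 : dpVals leB (Ar.take (N + 1)) ++ List.replicate (L - (N + 1)) (0 : Int)
      = dpVals leB (Ar.take N) ++ (1 + dpMax leB (Ar.getD N 0) (dpPairs leB (Ar.take N))) :: List.replicate (L - N - 1) 0 := by
    rw [List.take_succ_eq_append_getElem (show N < Ar.length by omega), dpVals_concat, ← hgetN]
    have : L - (N + 1) = L - N - 1 := by omega
    rw [this, List.append_assoc]
    rfl
  have hsplit2 : dpVals geB (Ar.take (N + 1)) ++ List.replicate (L - (N + 1)) (0 : Int)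
      = dpVals geB (Ar.take N) ++ (1 + dpMax geB (Ar.getD N 0) (dpPairs geB (Ar.take N))) :: List.replicate (L - N - 1) 0 := by
    rw [List.take_succ_eq_append_getElem (show N < Ar.length by omega), dpVals_concat, ← hgetN]
    have : L - (N + 1) = L - N - 1 := by omega
    rw [this, List.append_assoc]
    rfl
  have rn1 : (dpVals leB (Ar.take N) ++ (1 + dpMax leB (Ar.getD N 0) (dpPairs leB (Ar.take N))) :: List.replicate (L - N - 1) 0).getD N 0
      = 1 + dpMax leB (Ar.getD N 0) (dpPairs leB (Ar.take N)) := by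
    have h := getD_append_len (dpVals leB (Ar.take N)) (List.replicate (L - N - 1) 0)
      (1 + dpMax leB (Ar.getD N 0) (dpPairs leB (Ar.take N)))
    rw [hP1len] at h; exact h
  have rn2 : (dpVals geB (Ar.take N) ++ (1 + dpMax geB (Ar.getD N 0) (dpPairs geB (Ar.take N))) :: List.replicate (L - N - 1) 0).getD N 0
      = 1 + dpMax geB (Ar.getD N 0) (dpPairs geB (Ar.take N)) := by
    have h := getD_append_len (dpVals geB (Ar.take N)) (List.replicate (L - N - 1) 0)
      (1 + dpMax geB (Ar.getD N 0) (dpPairs geB (Ar.take N)))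
    rw [hP2len] at h; exact h
  simp only [outerF, hrep, Int.toNat_natCast]
  rw [hset1, hset2, hrange]
  rw [inner_inv Ar L N hN hL _ _ N (le_refl N)]
  rw [htkfull1, htkfull2]
  simp only [PySem.List.pyGetD_natCast]
  rw [rn1, rn2, hsplit1, hsplit2]

theorem outer_inv (Ar : List Int) (L : Nat) (hL : L ≤ Ar.length) :
    ∀ N, N ≤ L →
    ((List.range N).map (fun k : Nat => (k : Int))).foldl (outerF Ar)
      (List.replicate L 0, List.replicate L 0, 0)
    = (dpVals leB (Ar.take N) ++ List.replicate (L - N) 0,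
       dpVals geB (Ar.take N) ++ List.replicate (L - N) 0,
       ansFold (dpVals leB (Ar.take N)) (dpVals geB (Ar.take N))) := by
  intro N
  induction N with
  | zero => intro _; simp [dpVals, dpPairs, ansFold]
  | succ N ih =>
      intro h
      rw [List.range_succ, List.map_append, List.foldl_append, ih (by omega),
        List.map_singleton, List.foldl_cons, List.foldl_nil]
      rw [outer_step Ar L N (by omega) hL]
      have htk : (Ar.take N).length = N := by simp; omega
      have h1 : dpVals leB (Ar.take (N + 1))
          = dpVals leB (Ar.take N) ++ [1 + dpMax leB (Ar.getD N 0) (dpPairs leB (Ar.take N))] := by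
        rw [List.take_succ_eq_append_getElem (show N < Ar.length by omega), dpVals_concat]
        congr 2
        simp [List.getD, List.getElem?_eq_getElem (show N < Ar.length by omega)]
      have h2 : dpVals geB (Ar.take (N + 1))
          = dpVals geB (Ar.take N) ++ [1 + dpMax geB (Ar.getD N 0) (dpPairs geB (Ar.take N))] := by
        rw [List.take_succ_eq_append_getElem (show N < Ar.length by omega), dpVals_concat]
        congr 2
        simp [List.getD, List.getElem?_eq_getElem (show N < Ar.length by omega)]
      refine Prod.ext rfl (Prod.ext rfl ?_)
      show _ = ansFold (dpVals leB (Ar.take (N + 1))) (dpVals geB (Ar.take (N + 1)))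
      rw [h1, h2, ansFold_concat _ _ _ _ (by rw [length_dpVals, length_dpVals])]

theorem A_side (A : List Int) (lena : Int) (_h0 : 0 ≤ lena) (hlen : lena.toNat ≤ A.length) :
    ls A lena = ansFold (dpVals leB (A.reverse.take lena.toNat)) (dpVals geB (A.reverse.take lena.toNat)) := by
  have hlen' : lena.toNat ≤ A.reverse.length := by simpa using hlen
  have hR : PySem.List.pyRange 0 lena 1 = (List.range lena.toNat).map (fun k : Nat => (k : Int)) := by
    rw [PySem.List.pyRange_one, Int.sub_zero]
    exact List.map_congr_left (fun k _ => by omega)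
  rw [ls_eq, hR]
  have hinit : ((List.range lena.toNat).map (fun k : Nat => (k : Int))).map (fun _ => (0 : Int))
      = List.replicate lena.toNat 0 := by
    simp [Function.comp_def, List.map_const']
  rw [hinit]
  rw [outer_inv A.reverse lena.toNat hlen' lena.toNat (le_refl _)]

theorem dpMax_map_neg (y : Int) (ps : List (Int × Int)) :
    dpMax leB (-y) (ps.map (fun pr => (-pr.1, pr.2))) = dpMax geB y ps := by
  unfold dpMax
  rw [List.foldl_map]
  have hfun : (fun (m : Int) (p : Int × Int) =>
        if leB ((fun pr : Int × Int => (-pr.1, pr.2)) p).1 (-y) then max m ((fun pr : Int × Int => (-pr.1, pr.2)) p).2 else m)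
      = (fun (m : Int) (p : Int × Int) => if geB p.1 y then max m p.2 else m) := by
    funext m p
    by_cases h : y ≤ p.1 <;> simp [leB, geB, h]
  rw [hfun]

theorem B_side (xs : List Int) : lensB xs = dpVals leB xs := by
  have := lens_inv xs [] [] []
    (fun i j _ hj => absurd hj (by simp))
    (by simp [dpPairs]) (by simp) (by simp [dpVals, dpPairs])
  simpa [lensB] using this

theorem dp_neg (xs : List Int) :
    dpVals leB (xs.map (fun x => -x)) = dpVals geB xs := by
  have h : dpPairs leB (xs.map (fun x => -x)) = (dpPairs geB xs).map (fun pr => (-pr.1, pr.2)) := by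
    induction xs using List.reverseRecOn with
    | nil => rfl
    | append_singleton ys y ih =>
        rw [List.map_append, List.map_singleton, dpPairs_concat, dpPairs_concat, ih,
          List.map_append, List.map_singleton, dpMax_map_neg]
  simp [dpVals, h, List.map_map, Function.comp_def]

theorem alt_eq (A : List Int) (lena : Int) :
    ls_alt A lena = ansFold (dpVals leB (A.reverse.take (max lena 0).toNat)) (dpVals geB (A.reverse.take (max lena 0).toNat)) := by
  simp only [ls_alt]
  rw [B_side, B_side, dp_neg]
  unfold ansFold
  apply List.foldl_ext
  intro a ud _
  split_ifs <;> omega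

-- ===== VERDICT (by name: the statement is the Claim_ definition above) =====
theorem ls_spec : Claim_unchanged_ls := by
  intro A lena _ hpre hD
  rcases hpre with hle | hcorner
  · by_cases h0 : 0 ≤ lena
    · have hlen : lena.toNat ≤ A.length := by omega
      rw [alt_eq, A_side A lena h0 (by simpa using hlen)]
      have : max lena 0 = lena := by omega
      rw [this]
    · -- lena < 0 : both sides are 0
      have hr : PySem.List.pyRange 0 lena 1 = [] := PySem.List.pyRange_one_eq_nil (by omega)
      have hm : (max lena 0).toNat = 0 := by omega
      simp [ls, ls_alt, hr, hm, lensB]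
  · exact absurd ⟨hcorner.1, hcorner.2⟩ hD

theorem ls_changed : Claim_changed_ls := by unfold Claim_changed_ls; decide

theorem ls_tight : Claim_exact_ls := by
  intro A lena _ _ hD
  rcases hD with ⟨hA, hl⟩
  subst hA; subst hl
  decide
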